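-- pv_equiv track=rewrite | github.com/Tikava/rtm-project | app/core/ai_engine.py | attach_utility_tables
-- ===== SOURCE A (Python) =====
-- from typing import Dict, List, Any
-- from collections import defaultdict
--
-- def attach_utility_tables(components: List[List[str]], schema: Dict[str, Any], usage_map: Dict[tuple, int]) -> List[List[str]]:
--     """
--     Utility tables are small lookups like status/type/category. Attach them to the neighbor
--     with highest usage or FK ties.
--     """
--     utility_keywords = ("ref", "lookup", "dict", "type", "status", "code")
--     comp_index = {t: idx for idx, comp in enumerate(components) for t in comp}
--
--     # build FK degrees
--     relations = schema.get("relations", [])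
--     fk_adj = defaultdict(list)
--     for r in relations:
--         a, b = r.get("from"), r.get("to")
--         if a and b:
--             fk_adj[a].append(b)
--             fk_adj[b].append(a)
--
--     for table in list(comp_index.keys()):
--         low = table.lower()
--         if not any(k in low for k in utility_keywords):
--             continue
--         # find best neighbor comp by usage and degree
--         counts = defaultdict(int)
--         for nb in fk_adj.get(table, []):
--             nb_comp = comp_index.get(nb)
--             if nb_comp is None:
--                 continue
--             counts[nb_comp] += 1
--             counts[nb_comp] += usage_map.get(tuple(sorted((table, nb))), 0)
--         if not counts:
--             continue
--         best_comp = max(counts.items(), key=lambda x: x[1])[0]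
--         current_comp = comp_index.get(table)
--         if current_comp == best_comp:
--             continue
--         # move table
--         for comp in components:
--             if table in comp:
--                 comp.remove(table)
--         components[best_comp].append(table)
--         components[best_comp].sort()
--     components = [c for c in components if c]
--     return components
-- ===== SOURCE B (Python) =====
-- from typing import Dict, List, Any
--
--
-- def attach_utility_tables(components: List[List[str]], schema: Dict[str, Any], usage_map: Dict[tuple, int]) -> List[List[str]]:
--     """
--     Edge-centric rewrite: one single pass over schema['relations'] builds the
--     per-utility-table score dicts for ALL tables at once (no FK adjacency list,
--     no per-table rescans), then the moves are decided, and the result is rebuilt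
--     in one reconstruction pass (at most one sort per component).
--     Does NOT mutate `components`.
--     """
--     kws = ("ref", "lookup", "dict", "type", "status", "code")
--     comp_index = {t: i for i, comp in enumerate(components) for t in comp}
--
--     def is_utility(t):
--         low = t.lower()
--         return any(k in low for k in kws)
--
--     # single pass over the relations: score both endpoints of every edge occurrence
--     counts = {}  # utility table -> {component index: score}
--     for r in schema.get("relations", []):
--         a, b = r.get("from"), r.get("to")
--         if a and b:
--             for t, nb in ((a, b), (b, a)):
--                 if t in comp_index and is_utility(t):
--                     c = comp_index.get(nb)
--                     if c is not None:
--                         inner = counts.setdefault(t, {})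
--                         inner[c] = inner.get(c, 0) + 1 + usage_map.get(tuple(sorted((t, nb))), 0)
--
--     # decide the moves (frozen comp_index; first-seen max wins ties)
--     moves = []
--     for t in comp_index:
--         inner = counts.get(t, {})
--         if inner:
--             best = max(inner.items(), key=lambda kv: kv[1])[0]
--             if best != comp_index[t]:
--                 moves.append((t, best))
--
--     # rebuild the components in one pass: drop moved-away tables, sort in moved-in ones
--     result = []
--     for i, comp in enumerate(components):
--         kept = list(comp)
--         for t, _ in moves:
--             if t in kept:
--                 kept.remove(t)
--         incoming = [t for t, b in moves if b == i]
--         if incoming: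
--             kept = sorted(kept + incoming)
--         if kept:
--             result.append(kept)
--     return result
-- ===== Notes on version B (the rewrite author's own statement) =====
-- stated objective: alternative
-- what changed: B drops A's FK adjacency table and its interleaved decide-and-mutate loop: one single edge-centric pass over schema['relations'] builds the score dicts for all utility tables at once, the moves are then decided with a frozen comp_index, and the output is rebuilt in one reconstruction pass (at most one sort per component) instead of A's per-move remove/append/sort mutations (A mutates components in place; B does not).
import Mathlib
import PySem

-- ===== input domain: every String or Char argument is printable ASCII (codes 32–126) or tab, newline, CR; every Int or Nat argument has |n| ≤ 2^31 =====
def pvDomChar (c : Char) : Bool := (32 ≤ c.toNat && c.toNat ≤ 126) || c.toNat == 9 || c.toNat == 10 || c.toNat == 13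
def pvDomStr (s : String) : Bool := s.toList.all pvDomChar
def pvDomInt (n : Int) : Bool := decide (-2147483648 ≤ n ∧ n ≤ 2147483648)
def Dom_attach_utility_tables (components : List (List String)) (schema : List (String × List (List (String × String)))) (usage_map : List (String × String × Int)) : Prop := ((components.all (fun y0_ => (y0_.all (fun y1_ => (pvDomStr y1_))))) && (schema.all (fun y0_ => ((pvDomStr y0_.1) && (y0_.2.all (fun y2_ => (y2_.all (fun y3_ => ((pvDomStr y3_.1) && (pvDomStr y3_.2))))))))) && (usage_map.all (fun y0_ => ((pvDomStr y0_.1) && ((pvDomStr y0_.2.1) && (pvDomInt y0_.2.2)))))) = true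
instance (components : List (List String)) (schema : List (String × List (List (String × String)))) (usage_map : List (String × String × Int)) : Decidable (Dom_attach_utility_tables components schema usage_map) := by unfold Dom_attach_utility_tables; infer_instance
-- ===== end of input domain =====

-- B replaces A's adjacency-list-then-mutate algorithm by an edge-centric one: a SINGLE pass over
-- schema['relations'] builds the per-utility-table score dicts for all tables at once, the moves are
-- decided in a second pass, and the output is REBUILT in one reconstruction pass (at most one sort
-- per component) instead of A's interleaved remove/append/sort mutations (objective: alternative).
-- NOTE: Python A mutates `components` in place while B works on a copy; the equivalence proved here
-- is about the RETURN value.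

-- shared tiny dict.get helpers (the same Python expressions occur verbatim in A and in B)
-- r.get(k) on a dict-as-association-list: first match
def pvGet (r : List (String × String)) (k : String) : Option String :=
  (r.find? (fun p => p.1 == k)).map (fun p => p.2)

-- schema.get("relations", [])
def pvGetRel (schema : List (String × List (List (String × String)))) : List (List (String × String)) :=
  ((schema.find? (fun p => p.1 == "relations")).map (fun p => p.2)).getD []

-- comp_index = {t: idx for idx, comp in enumerate(components) for t in comp}
def pvCompIndex (components : List (List String)) : PySem.Dict String Int :=
  (PySem.List.enumerate components).foldl
    (fun d p => p.2.foldl (fun d t => d.insert t p.1) d) PySem.Dict.empty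

-- any(k in table.lower() for k in utility_keywords)
def pvIsUtility (table : String) : Bool :=
  ["ref", "lookup", "dict", "type", "status", "code"].any
    (fun k => PySem.Str.isIn k (PySem.Str.lower table))

-- usage_map.get(tuple(sorted((table, nb))), 0)
def pvUsage (usage_map : List (String × String × Int)) (table nb : String) : Int :=
  let key : String × String := if nb < table then (nb, table) else (table, nb)
  ((usage_map.find? (fun e => e.1 == key.1 && e.2.1 == key.2)).map (fun e => e.2.2)).getD 0

-- ===== PORT A =====
-- fk_adj built with defaultdict(list): fk_adj[a].append(b); fk_adj[b].append(a)
def aFkAdj (relations : List (List (String × String))) : PySem.Dict String (List String) :=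
  relations.foldl
    (fun d r =>
      match pvGet r "from", pvGet r "to" with
      | some a, some b =>
          if (a != "") && (b != "") then
            (d.modify a [] (fun l => l ++ [b])).modify b [] (fun l => l ++ [a])
          else d
      | _, _ => d)
    PySem.Dict.empty

-- counts = defaultdict(int); two 'counts[nb_comp] +=' statements per neighbour occurrence
def aCounts (ci : PySem.Dict String Int) (usage_map : List (String × String × Int))
    (fk : PySem.Dict String (List String)) (table : String) : PySem.Dict Int Int :=
  (fk.getD table []).foldl
    (fun cnt nb =>
      match ci.get? nb with
      | none => cnt
      | some c => (cnt.modify c 0 (fun v => v + 1)).modify c 0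
          (fun v => v + pvUsage usage_map table nb))
    PySem.Dict.empty

-- one iteration of A's 'for table in list(comp_index.keys())' loop, acting on the mutable components
def aStep (ci : PySem.Dict String Int) (usage_map : List (String × String × Int))
    (fk : PySem.Dict String (List String)) (comps : List (List String)) (table : String) :
    List (List String) :=
  if !pvIsUtility table then comps
  else
    match PySem.List.max? (aCounts ci usage_map fk table).items (fun p => p.2) with
    | none => comps
    | some p =>
        if ci.get? table == some p.1 then comps
        else
          let comps' := comps.map (fun comp => if comp.contains table then comp.erase table else comp)
          PySem.List.pySetD comps' p.1
            (PySem.List.sorted (PySem.List.pyGetD comps' p.1 [] ++ [table]) (fun x => x) false)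

def attach_utility_tables (components : List (List String)) (schema : List (String × List (List (String × String)))) (usage_map : List (String × String × Int)) : List (List String) :=
  let ci := pvCompIndex components
  let fk := aFkAdj (pvGetRel schema)
  ((ci.keys.foldl (aStep ci usage_map fk) components).filter (fun c => !c.isEmpty))

-- ===== PORT B =====
-- one scoring step of B's single relation pass: endpoint t, neighbour nb
-- (counts.setdefault(t, {}) followed by inner[c] = inner.get(c,0) + 1 + usage is Dict.modify)
def bScore (ci : PySem.Dict String Int) (usage_map : List (String × String × Int))
    (cs : PySem.Dict String (PySem.Dict Int Int)) (t nb : String) :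
    PySem.Dict String (PySem.Dict Int Int) :=
  if ci.contains t && pvIsUtility t then
    match ci.get? nb with
    | none => cs
    | some c =>
        cs.modify t PySem.Dict.empty
          (fun inner => inner.insert c (inner.getD c 0 + 1 + pvUsage usage_map t nb))
  else cs

-- counts = {}; one single pass over the relations, scoring both endpoints of each edge
def bCountsAll (ci : PySem.Dict String Int) (usage_map : List (String × String × Int))
    (relations : List (List (String × String))) : PySem.Dict String (PySem.Dict Int Int) :=
  relations.foldl
    (fun cs r =>
      match pvGet r "from", pvGet r "to" with
      | some a, some b =>
          if (a != "") && (b != "") then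
            [(a, b), (b, a)].foldl (fun cs p => bScore ci usage_map cs p.1 p.2) cs
          else cs
      | _, _ => cs)
    PySem.Dict.empty

-- moves = [(t, best)] for every table whose `if inner:` fires with best != comp_index[t]
-- (max? is none exactly when inner is empty, i.e. when Python's `if inner:` fails)
def bMoves (ci : PySem.Dict String Int) (counts : PySem.Dict String (PySem.Dict Int Int)) :
    List (String × Int) :=
  ci.keys.foldl
    (fun ms t =>
      match PySem.List.max? (counts.getD t PySem.Dict.empty).items (fun kv => kv.2) with
      | none => ms
      | some p => if ci.get? t == some p.1 then ms else ms ++ [(t, p.1)])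
    []

-- the reconstruction pass: kept = comp minus moved-away tables; sort once where tables moved in
def bRebuild (moves : List (String × Int)) (components : List (List String)) :
    List (List String) :=
  (PySem.List.enumerate components).foldl
    (fun res ic =>
      let kept := moves.foldl (fun kept m => if kept.contains m.1 then kept.erase m.1 else kept) ic.2
      let inc := (moves.filter (fun m => m.2 == ic.1)).map (fun m => m.1)
      let kept := if !inc.isEmpty then PySem.List.sorted (kept ++ inc) (fun x => x) false else kept
      if !kept.isEmpty then res ++ [kept] else res)
    []

def attach_utility_tables_alt (components : List (List String)) (schema : List (String × List (List (String × String)))) (usage_map : List (String × String × Int)) : List (List String) :=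
  let ci := pvCompIndex components
  bRebuild (bMoves ci (bCountsAll ci usage_map (pvGetRel schema))) components

-- ===== PRECONDITION & SPEC =====
def Spec_attach_utility_tables (components : List (List String)) (schema : List (String × List (List (String × String)))) (usage_map : List (String × String × Int)) (out : List (List String)) : Prop := out = attach_utility_tables_alt components schema usage_map
instance (components : List (List String)) (schema : List (String × List (List (String × String)))) (usage_map : List (String × String × Int)) (out : List (List String)) : Decidable (Spec_attach_utility_tables components schema usage_map out) := by unfold Spec_attach_utility_tables; infer_instance

-- ===== CLAIM (what is proved, stated in full; the proofs are below) =====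
def Claim_equal_attach_utility_tables : Prop := ∀ (components : List (List String)) (schema : List (String × List (List (String × String)))) (usage_map : List (String × String × Int)), Dom_attach_utility_tables components schema usage_map → Spec_attach_utility_tables components schema usage_map (attach_utility_tables components schema usage_map)

-- ===== LEMMAS AND PROOFS =====

-- ---- proof-only helpers ----

-- the (owner, neighbour) pairs a relation contributes (A appends them into fk_adj;
-- B scores them directly)
def pvEdges (r : List (String × String)) : List (String × String) :=
  match pvGet r "from", pvGet r "to" with
  | some a, some b => if (a != "") && (b != "") then [(a, b), (b, a)] else []
  | _, _ => []

-- the neighbour occurrences of `table` contributed by one relation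
def pContrib (table : String) (r : List (String × String)) : List String :=
  ((pvEdges r).filter (fun p => p.1 == table)).map (fun p => p.2)

-- per-table score dict, single-insert form
def pCounts (ci : PySem.Dict String Int) (um : List (String × String × Int))
    (relations : List (List (String × String))) (table : String) : PySem.Dict Int Int :=
  (relations.flatMap (pContrib table)).foldl
    (fun cnt nb =>
      match ci.get? nb with
      | none => cnt
      | some c => cnt.insert c (cnt.getD c 0 + 1 + pvUsage um table nb))
    PySem.Dict.empty

-- the per-table decision A's loop body effectively takes
def pDecide (ci : PySem.Dict String Int) (um : List (String × String × Int))
    (relations : List (List (String × String))) (table : String) : Option Int :=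
  if !pvIsUtility table then none
  else
    match PySem.List.max? (pCounts ci um relations table).items (fun p => p.2) with
    | none => none
    | some p => if ci.get? table == some p.1 then none else some p.1

-- applying one move the way A mutates `components`
def pApply (comps : List (List String)) (m : String × Int) : List (List String) :=
  let comps' := comps.map (fun comp => if comp.contains m.1 then comp.erase m.1 else comp)
  PySem.List.pySetD comps' m.2
    (PySem.List.sorted (PySem.List.pyGetD comps' m.2 [] ++ [m.1]) (fun x => x) false)

-- erase the first occurrence of each of ts
def pEraseAll (ts : List String) (l : List String) : List String :=
  ts.foldl (fun l t => l.erase t) l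

-- what bRebuild produces for one enumerated component
def pProc (moves : List (String × Int)) (ic : Int × List String) : List String :=
  let kept := pEraseAll (moves.map (fun m => m.1)) ic.2
  let inc := (moves.filter (fun m => m.2 == ic.1)).map (fun m => m.1)
  if !inc.isEmpty then PySem.List.sorted (kept ++ inc) (fun x => x) false else kept

-- comp_index flattened to a single insert loop
def pPairsCI (components : List (List String)) : List (String × Int) :=
  (PySem.List.enumerate components).flatMap (fun p => p.2.map (fun t => (t, p.1)))

-- ---- A-side: the adjacency list is the flatMap of pvEdges ----

lemma aFkAdj_eq_flatMap (relations : List (List (String × String))) :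
    aFkAdj relations =
      (relations.flatMap pvEdges).foldl
        (fun d p => d.modify p.1 [] (fun l => l ++ [p.2])) PySem.Dict.empty := by
  rw [List.foldl_flatMap]
  unfold aFkAdj
  apply PySem.List.foldl_congr_mem
  intro d r _
  unfold pvEdges
  rcases pvGet r "from" with _ | a <;> rcases pvGet r "to" with _ | b <;> simp
  split <;> simp [List.foldl]

lemma nbrs_eq (relations : List (List (String × String))) (t : String) :
    (aFkAdj relations).getD t [] = relations.flatMap (pContrib t) := by
  rw [aFkAdj_eq_flatMap, PySem.Dict.getD_foldl_modify_append, PySem.Dict.getD_empty,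
    List.filter_flatMap, List.map_flatMap]
  simp only [List.nil_append]
  rfl

-- the two += statements of A collapse to one single dict write
lemma step_eq (ci : PySem.Dict String Int) (um : List (String × String × Int)) (t : String) :
    (fun (cnt : PySem.Dict Int Int) (nb : String) =>
        match ci.get? nb with
        | none => cnt
        | some c => (cnt.modify c 0 (fun v => v + 1)).modify c 0
            (fun v => v + pvUsage um t nb)) =
    (fun (cnt : PySem.Dict Int Int) (nb : String) =>
        match ci.get? nb with
        | none => cnt
        | some c => cnt.insert c (cnt.getD c 0 + 1 + pvUsage um t nb)) := by
  funext cnt nb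
  rcases h : ci.get? nb with _ | c
  · rfl
  · show ((cnt.insert c (cnt.getD c 0 + 1)).insert c
        ((cnt.insert c (cnt.getD c 0 + 1)).getD c 0 + pvUsage um t nb)) = _
    rw [PySem.Dict.getD_insert_self, PySem.Dict.insert_insert_self]

lemma aCounts_eq_pCounts (ci : PySem.Dict String Int) (um : List (String × String × Int))
    (relations : List (List (String × String))) (t : String) :
    aCounts ci um (aFkAdj relations) t = pCounts ci um relations t := by
  unfold aCounts pCounts
  rw [nbrs_eq, step_eq]

lemma aStep_eq_pDecide (ci : PySem.Dict String Int) (um : List (String × String × Int))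
    (relations : List (List (String × String))) (comps : List (List String)) (t : String) :
    aStep ci um (aFkAdj relations) comps t =
      match pDecide ci um relations t with
      | none => comps
      | some b => pApply comps (t, b) := by
  unfold aStep pDecide
  rw [aCounts_eq_pCounts]
  by_cases hu : pvIsUtility t
  · simp only [hu, Bool.not_true, Bool.false_eq_true, reduceIte]
    rcases PySem.List.max? (pCounts ci um relations t).items (fun p => p.2) with _ | p
    · rfl
    · by_cases hc : ci.get? t == some p.1 <;> simp [hc, pApply]
  · simp [hu]

-- A's interleaved loop is the fold of pApply over the decided moves
lemma fuse (dec : String → Option Int) (keys : List String) :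
    ∀ (ms : List (String × Int)) (comps : List (List String)),
      (keys.foldl (fun ms t => match dec t with
          | none => ms
          | some b => ms ++ [(t, b)]) ms).foldl pApply comps
      = keys.foldl (fun comps t => match dec t with
          | none => comps
          | some b => pApply comps (t, b)) (ms.foldl pApply comps) := by
  induction keys with
  | nil => intro ms comps; rfl
  | cons k ks ih =>
      intro ms comps
      simp only [List.foldl_cons]
      rcases h : dec k with _ | b
      · exact ih ms comps
      · simp only [ih (ms ++ [(k, b)]) comps, List.foldl_append, List.foldl_cons,
          List.foldl_nil]

-- the decided move list, as a filterMap
lemma moves_eq_filterMap (dec : String → Option Int) (keys : List String) :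
    ∀ ms, keys.foldl (fun ms t => match dec t with
        | none => ms
        | some b => ms ++ [(t, b)]) ms
      = ms ++ keys.filterMap (fun t => (dec t).map (fun b => (t, b))) := by
  induction keys with
  | nil => intro ms; simp
  | cons k ks ih =>
      intro ms
      simp only [List.foldl_cons, List.filterMap_cons]
      rcases h : dec k with _ | b
      · simp [ih ms]
      · simp [ih (ms ++ [(k, b)])]

-- ---- B-side, phase 1: the single relation pass projects to the per-table dicts ----

lemma bCountsAll_eq_flatMap (ci : PySem.Dict String Int) (um : List (String × String × Int))
    (relations : List (List (String × String))) :
    bCountsAll ci um relations =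
      (relations.flatMap pvEdges).foldl (fun cs p => bScore ci um cs p.1 p.2)
        PySem.Dict.empty := by
  rw [List.foldl_flatMap]
  unfold bCountsAll
  apply PySem.List.foldl_congr_mem
  intro cs r _
  unfold pvEdges
  rcases pvGet r "from" with _ | a <;> rcases pvGet r "to" with _ | b <;> simp
  split <;> simp [List.foldl]

lemma bScore_proj (ci : PySem.Dict String Int) (um : List (String × String × Int))
    (cs : PySem.Dict String (PySem.Dict Int Int)) (p : String × String) (t : String)
    (hg : ci.contains t && pvIsUtility t) :
    (bScore ci um cs p.1 p.2).getD t PySem.Dict.empty =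
      if p.1 == t then
        (match ci.get? p.2 with
         | none => cs.getD t PySem.Dict.empty
         | some c => (cs.getD t PySem.Dict.empty).insert c
             ((cs.getD t PySem.Dict.empty).getD c 0 + 1 + pvUsage um t p.2))
      else cs.getD t PySem.Dict.empty := by
  by_cases hpt : p.1 = t
  · subst hpt
    unfold bScore
    simp only [hg, if_pos, beq_self_eq_true]
    rcases ci.get? p.2 with _ | c
    · rfl
    · rw [PySem.Dict.getD_modify]
      simp
  · unfold bScore
    have hne : (p.1 == t) = false := by simpa using hpt
    simp only [hne, Bool.false_eq_true, if_false]
    by_cases hg' : ci.contains p.1 && pvIsUtility p.1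
    · simp only [hg', if_true]
      rcases ci.get? p.2 with _ | c
      · rfl
      · rw [PySem.Dict.getD_modify, if_neg (fun h => hpt h.symm)]
    · simp [hg']

lemma bScore_proj_skip (ci : PySem.Dict String Int) (um : List (String × String × Int))
    (cs : PySem.Dict String (PySem.Dict Int Int)) (p : String × String) (t : String)
    (hg : (ci.contains t && pvIsUtility t) = false) :
    (bScore ci um cs p.1 p.2).getD t PySem.Dict.empty = cs.getD t PySem.Dict.empty := by
  unfold bScore
  by_cases hg' : ci.contains p.1 && pvIsUtility p.1
  · have hpt : p.1 ≠ t := by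
      intro h; rw [h] at hg'; simp [hg'] at hg
    simp only [hg', if_true]
    rcases ci.get? p.2 with _ | c
    · rfl
    · rw [PySem.Dict.getD_modify, if_neg (fun h => hpt h.symm)]
  · simp [hg']

lemma counts_proj_fold (ci : PySem.Dict String Int) (um : List (String × String × Int))
    (t : String) (ps : List (String × String)) :
    ∀ cs : PySem.Dict String (PySem.Dict Int Int),
      (ps.foldl (fun cs p => bScore ci um cs p.1 p.2) cs).getD t PySem.Dict.empty =
      if ci.contains t && pvIsUtility t then
        (ps.filter (fun p => p.1 == t)).foldl
          (fun cnt p =>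
            match ci.get? p.2 with
            | none => cnt
            | some c => cnt.insert c (cnt.getD c 0 + 1 + pvUsage um t p.2))
          (cs.getD t PySem.Dict.empty)
      else cs.getD t PySem.Dict.empty := by
  induction ps with
  | nil => intro cs; split <;> rfl
  | cons p ps ih =>
      intro cs
      by_cases hg : ci.contains t && pvIsUtility t
      · simp only [hg, if_true] at ih ⊢
        simp only [List.foldl_cons, List.filter_cons]
        by_cases hpt : p.1 == t
        · simp only [hpt, if_true, List.foldl_cons]
          rw [ih, bScore_proj ci um cs p t hg, if_pos hpt]
        · have : (p.1 == t) = false := by simpa using hpt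
          simp only [this, Bool.false_eq_true, if_false]
          rw [ih, bScore_proj ci um cs p t hg, if_neg (by simp [this])]
      · have hg' : (ci.contains t && pvIsUtility t) = false := by simpa using hg
        simp only [hg', Bool.false_eq_true, if_false] at ih ⊢
        simp only [List.foldl_cons]
        rw [ih, bScore_proj_skip ci um cs p t hg']

lemma contrib_flat (relations : List (List (String × String))) (t : String) :
    relations.flatMap (pContrib t) =
      ((relations.flatMap pvEdges).filter (fun p => p.1 == t)).map (fun p => p.2) := by
  rw [List.filter_flatMap, List.map_flatMap]
  rfl

lemma counts_proj (ci : PySem.Dict String Int) (um : List (String × String × Int))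
    (relations : List (List (String × String))) (t : String) :
    (bCountsAll ci um relations).getD t PySem.Dict.empty =
      if ci.contains t && pvIsUtility t then pCounts ci um relations t
      else PySem.Dict.empty := by
  rw [bCountsAll_eq_flatMap, counts_proj_fold, PySem.Dict.getD_empty]
  unfold pCounts
  rw [contrib_flat, List.foldl_map]

-- ---- B-side, phase 2: the move lists agree ----

lemma bMoves_eq (ci : PySem.Dict String Int) (um : List (String × String × Int))
    (relations : List (List (String × String))) :
    bMoves ci (bCountsAll ci um relations) =
      ci.keys.foldl (fun ms t => match pDecide ci um relations t with
        | none => ms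
        | some b => ms ++ [(t, b)]) [] := by
  unfold bMoves
  apply PySem.List.foldl_congr_mem
  intro ms t ht
  have hc : ci.contains t = true := (PySem.Dict.contains_iff_mem_keys ci t).mpr ht
  rw [counts_proj]
  unfold pDecide
  by_cases hu : pvIsUtility t
  · simp only [hc, hu, Bool.and_self, if_true, Bool.not_true, Bool.false_eq_true, if_false]
    rcases PySem.List.max? (pCounts ci um relations t).items (fun p => p.2) with _ | p
    · rfl
    · cases hcc : (ci.get? t == some p.1) <;> simp [hcc]
  · have : (pvIsUtility t) = false := by simpa using hu
    simp only [hc, this, Bool.and_false, Bool.false_eq_true, if_false, Bool.not_false, if_true]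
    have hemp : (PySem.Dict.empty : PySem.Dict Int Int).items = [] := rfl
    rw [hemp]
    rfl

-- ---- nonnegativity of every decided target index ----

lemma pvCompIndex_eq_pairs (components : List (List String)) :
    pvCompIndex components =
      (pPairsCI components).foldl (fun d q => d.insert q.1 q.2) PySem.Dict.empty := by
  unfold pPairsCI
  rw [List.foldl_flatMap]
  unfold pvCompIndex
  apply PySem.List.foldl_congr_mem
  intro d p _
  rw [List.foldl_map]

lemma get?_foldl_insert_nonneg (l : List (String × Int)) :
    ∀ d : PySem.Dict String Int, (∀ q ∈ l, 0 ≤ q.2) → (∀ k v, d.get? k = some v → 0 ≤ v) →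
    ∀ k v, (l.foldl (fun d q => d.insert q.1 q.2) d).get? k = some v → 0 ≤ v := by
  induction l with
  | nil => intro d _ hd; exact hd
  | cons q l ih =>
      intro d hl hd
      simp only [List.foldl_cons]
      refine ih _ (fun q' hq' => hl q' (List.mem_cons_of_mem _ hq')) ?_
      intro k v h
      rw [PySem.Dict.get?_insert] at h
      split at h
      · cases h; exact hl q (List.mem_cons_self ..)
      · exact hd k v h

lemma compIndex_nonneg (components : List (List String)) :
    ∀ k v, (pvCompIndex components).get? k = some v → 0 ≤ v := by
  rw [pvCompIndex_eq_pairs]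
  refine get?_foldl_insert_nonneg _ _ ?_ ?_
  · intro q hq
    unfold pPairsCI at hq
    rw [List.mem_flatMap] at hq
    obtain ⟨p, hp, hq⟩ := hq
    rw [List.mem_map] at hq
    obtain ⟨s, _, rfl⟩ := hq
    rw [PySem.List.mem_enumerate_iff] at hp
    obtain ⟨j, _, rfl⟩ := hp
    simp
  · intro k v h
    rw [PySem.Dict.get?_empty] at h
    cases h

lemma items_nonneg_fold (ci : PySem.Dict String Int) (um : List (String × String × Int))
    (t : String) (hci : ∀ k v, ci.get? k = some v → 0 ≤ v) (l : List String) :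
    ∀ cnt : PySem.Dict Int Int, (∀ q ∈ cnt.items, 0 ≤ q.1) →
    ∀ q ∈ (l.foldl (fun cnt nb =>
        match ci.get? nb with
        | none => cnt
        | some c => cnt.insert c (cnt.getD c 0 + 1 + pvUsage um t nb)) cnt).items, 0 ≤ q.1 := by
  induction l with
  | nil => intro cnt h; exact h
  | cons nb l ih =>
      intro cnt h
      simp only [List.foldl_cons]
      refine ih _ ?_
      rcases hnb : ci.get? nb with _ | c
      · exact h
      · intro q hq
        rw [PySem.Dict.mem_items_insert] at hq
        rcases hq with rfl | ⟨hq, _⟩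
        · exact hci nb c hnb
        · exact h q hq

lemma pDecide_nonneg (ci : PySem.Dict String Int) (um : List (String × String × Int))
    (relations : List (List (String × String))) (t : String) (b : Int)
    (hci : ∀ k v, ci.get? k = some v → 0 ≤ v) :
    pDecide ci um relations t = some b → 0 ≤ b := by
  unfold pDecide
  by_cases hu : pvIsUtility t
  · simp only [hu, Bool.not_true, Bool.false_eq_true, if_false]
    rcases hm : PySem.List.max? (pCounts ci um relations t).items (fun p => p.2) with _ | p
    · intro h; cases h
    · cases hif : (ci.get? t == some p.1)
      · simp only [hif, Bool.false_eq_true, if_false]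
        intro h
        cases h
        have hp := PySem.List.max?_mem hm
        have hni := items_nonneg_fold ci um t hci (relations.flatMap (pContrib t))
          PySem.Dict.empty (by intro q hq; cases hq)
        exact hni p (by unfold pCounts at hp; exact hp)
      · simp only [hif, if_true]
        intro h; cases h
  · simp [hu]

lemma compIndex_keys_nodup (components : List (List String)) :
    (pvCompIndex components).keys.Nodup := by
  rw [pvCompIndex_eq_pairs]
  exact PySem.Dict.nodup_keys_foldl_insert_key (pPairsCI components)
    (fun q => q.1) (fun _ q => q.2) PySem.Dict.empty PySem.Dict.nodup_keys_empty

lemma moves_fst_sublist (dec : String → Option Int) (keys : List String) :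
    ((keys.filterMap (fun t => (dec t).map (fun b => (t, b)))).map (fun m => m.1)).Sublist
      keys := by
  induction keys with
  | nil => simp
  | cons k ks ih =>
      simp only [List.filterMap_cons]
      rcases dec k with _ | b
      · exact ih.cons _
      · simpa using ih.cons₂ k

-- ---- the rebuild pass vs the fold of pApply ----

lemma eguard (l : List String) (t : String) :
    (if l.contains t then l.erase t else l) = l.erase t := by
  by_cases h : t ∈ l <;> simp [h, List.erase_of_not_mem]

lemma foldl_guard_erase (moves : List (String × Int)) (c : List String) :
    moves.foldl (fun kept m => if kept.contains m.1 then kept.erase m.1 else kept) c =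
      pEraseAll (moves.map (fun m => m.1)) c := by
  unfold pEraseAll
  rw [List.foldl_map]
  apply PySem.List.foldl_congr_mem
  intro kept m _
  exact eguard kept m.1

lemma erase_sorted (l : List String) (t : String) :
    (PySem.List.sorted l (fun x => x) false).erase t =
      PySem.List.sorted (l.erase t) (fun x => x) false := by
  symm
  apply PySem.List.sorted_id_eq_of_perm_of_pairwise
  · exact List.Perm.erase t (PySem.List.sorted_perm l (fun x => x) false)
  · exact List.Pairwise.sublist List.erase_sublist
      (PySem.List.sorted_pairwise l (fun x => x))

lemma eraseAll_sorted (ts : List String) :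
    ∀ l : List String,
      pEraseAll ts (PySem.List.sorted l (fun x => x) false) =
        PySem.List.sorted (pEraseAll ts l) (fun x => x) false := by
  induction ts with
  | nil => intro l; rfl
  | cons t ts ih =>
      intro l
      show pEraseAll ts ((PySem.List.sorted l (fun x => x) false).erase t) = _
      rw [erase_sorted, ih]
      rfl

lemma eraseAll_append_singleton (ts : List String) :
    ∀ (l : List String) (t0 : String), t0 ∉ ts →
      pEraseAll ts (l ++ [t0]) = pEraseAll ts l ++ [t0] := by
  induction ts with
  | nil => intro l t0 _; rfl
  | cons s ts ih =>
      intro l t0 h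
      have hs : s ≠ t0 := fun he => h (he ▸ List.mem_cons_self ..)
      have hts : t0 ∉ ts := fun he => h (List.mem_cons_of_mem _ he)
      show pEraseAll ts ((l ++ [t0]).erase s) = pEraseAll ts (l.erase s) ++ [t0]
      by_cases hm : s ∈ l
      · rw [List.erase_append_left _ hm, ih _ _ hts]
      · rw [List.erase_append_right _ hm, List.erase_of_not_mem (by simp [hs]),
          List.erase_of_not_mem hm, ih _ _ hts]

lemma bRebuild_eq_map_filter (moves : List (String × Int)) (comps : List (List String)) :
    bRebuild moves comps =
      (((PySem.List.enumerate comps).map (pProc moves)).filter (fun c => !c.isEmpty)) := by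
  unfold bRebuild
  have hb : (fun (res : List (List String)) (ic : Int × List String) =>
      let kept := moves.foldl (fun kept m => if kept.contains m.1 then kept.erase m.1 else kept) ic.2
      let inc := (moves.filter (fun m => m.2 == ic.1)).map (fun m => m.1)
      let kept := if !inc.isEmpty then PySem.List.sorted (kept ++ inc) (fun x => x) false else kept
      if !kept.isEmpty then res ++ [kept] else res) =
      (fun res ic => if (fun ic => !(pProc moves ic).isEmpty) ic then res ++ [pProc moves ic] else res) := by
    funext res ic
    show (if !(if !((moves.filter (fun m => m.2 == ic.1)).map (fun m => m.1)).isEmpty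
        then PySem.List.sorted ((moves.foldl (fun kept m => if kept.contains m.1 then kept.erase m.1 else kept) ic.2) ++ ((moves.filter (fun m => m.2 == ic.1)).map (fun m => m.1))) (fun x => x) false
        else (moves.foldl (fun kept m => if kept.contains m.1 then kept.erase m.1 else kept) ic.2)).isEmpty
      then res ++ [_] else res) = _
    rw [foldl_guard_erase]
    rfl
  rw [hb, PySem.List.foldl_append_if (fun ic => !(pProc moves ic).isEmpty) (pProc moves),
    List.filter_map]
  rfl

lemma rebuild_main (moves : List (String × Int)) :
    ∀ comps : List (List String),
      (moves.map (fun m => m.1)).Nodup → (∀ m ∈ moves, 0 ≤ m.2) →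
      (moves.foldl pApply comps).filter (fun c => !c.isEmpty) = bRebuild moves comps := by
  induction moves with
  | nil =>
      intro comps _ _
      rw [bRebuild_eq_map_filter]
      simp only [List.foldl_nil]
      congr 1
      have : pProc [] = (fun ic : Int × List String => ic.2) := by
        funext ic; rfl
      rw [this, PySem.List.map_snd_enumerate]
  | cons m0 rest ih =>
      intro comps hnd hnn
      simp only [List.map_cons, List.nodup_cons] at hnd
      simp only [List.foldl_cons]
      rw [ih (pApply comps m0) hnd.2 (fun m hm => hnn m (List.mem_cons_of_mem _ hm))]
      rw [bRebuild_eq_map_filter, bRebuild_eq_map_filter]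
      congr 1
      have hb0 : (0 : Int) ≤ m0.2 := hnn m0 (List.mem_cons_self ..)
      apply List.ext_getElem
      · simp only [List.length_map, PySem.List.length_enumerate]
        unfold pApply
        simp [PySem.List.length_pySetD]
      · intro k h1 h2
        simp only [List.length_map, PySem.List.length_enumerate] at h1 h2
        have hlen : (pApply comps m0).length = comps.length := by
          unfold pApply; simp [PySem.List.length_pySetD]
        have hk : k < comps.length := h2
        simp only [List.getElem_map]
        rw [PySem.List.getElem_enumerate _ _ k (by simpa [PySem.List.length_enumerate, hlen] using h1),
          PySem.List.getElem_enumerate _ _ k (by simpa [PySem.List.length_enumerate] using h2)]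
        simp only [zero_add]
        -- compute the k-th component after applying the first move
        have hget? : (pApply comps m0)[k]? =
            some (if m0.2.toNat = k then
              PySem.List.sorted (comps[k].erase m0.1 ++ [m0.1]) (fun x => x) false
            else comps[k].erase m0.1) := by
          show (PySem.List.pySetD
              (comps.map (fun comp => if comp.contains m0.1 then comp.erase m0.1 else comp)) m0.2
              (PySem.List.sorted (PySem.List.pyGetD
                (comps.map (fun comp => if comp.contains m0.1 then comp.erase m0.1 else comp)) m0.2 [] ++ [m0.1])
                (fun x => x) false))[k]? = _
          rw [PySem.List.pySetD_of_nonneg _ _ hb0, List.getElem?_set]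
          by_cases hc : m0.2.toNat = k
          · have hlt : m0.2 < ((comps.map (fun comp => if comp.contains m0.1 then comp.erase m0.1 else comp)).length : Int) := by
              simp only [List.length_map]
              omega
            rw [if_pos hc, if_pos (by simpa using (by omega : m0.2.toNat < comps.length)), if_pos hc,
              PySem.List.pyGetD_eq_getElem _ _ hb0 hlt]
            simp only [hc, List.getElem_map, eguard]
          · rw [if_neg hc, if_neg hc, List.getElem?_map,
              List.getElem?_eq_getElem hk, Option.map_some, eguard]
        have hel : (pApply comps m0)[k]'(by omega) =
            (if m0.2.toNat = k then
              PySem.List.sorted (comps[k].erase m0.1 ++ [m0.1]) (fun x => x) false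
            else comps[k].erase m0.1) := by
          rw [List.getElem_eq_iff]
          exact hget?
        rw [hel]
        by_cases hc : m0.2.toNat = k
        · rw [if_pos hc]
          -- moved-into component: both sides sort the same multiset
          have hbk : m0.2 = (k : Int) := by omega
          unfold pProc
          simp only [List.map_cons, List.filter_cons]
          have : (m0.2 == (k : Int)) = true := by simpa using hbk
          rw [this]
          simp only [if_true, List.map_cons]
          show (if !((rest.filter (fun m => m.2 == (k : Int))).map (fun m => m.1)).isEmpty
              then _ else _) = _
          set ts := rest.map (fun m => m.1) with hts
          set E := comps[k].erase m0.1 with hE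
          set inc := (rest.filter (fun m => m.2 == (k : Int))).map (fun m => m.1) with hinc
          have hkp : pEraseAll ts (PySem.List.sorted (E ++ [m0.1]) (fun x => x) false) =
              PySem.List.sorted (pEraseAll ts E ++ [m0.1]) (fun x => x) false := by
            rw [eraseAll_sorted, eraseAll_append_singleton ts E m0.1 hnd.1]
          have hkept2 : pEraseAll (m0.1 :: ts) comps[k] = pEraseAll ts E := rfl
          rw [hkept2]
          rcases hie : inc.isEmpty with _ | _
          · -- incoming from the rest as well: one big sort on each side
            simp only [Bool.not_false, if_true, hkp]
            rw [if_pos (by simp : (!(m0.1 :: inc).isEmpty) = true)]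
            refine PySem.List.sorted_eq_sorted_of_perm _ _ _ (fun a b h => h) ?_
            have hp := (PySem.List.sorted_perm (pEraseAll ts E ++ [m0.1])
              (fun x => x) false).append_right inc
            simpa using hp
          · -- no other incoming: the erased sorted list is the sorted erased list
            rw [if_neg (by simp), hkp,
              if_pos (by simp : (!(m0.1 :: inc).isEmpty) = true), List.isEmpty_iff.mp hie]
        · rw [if_neg hc]
          -- untouched component: the first move only erases its table here
          unfold pProc
          simp only [List.map_cons, List.filter_cons]
          have hne : (m0.2 == (k : Int)) = false := by
            simp only [beq_eq_false_iff_ne, ne_eq]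
            intro he; exact hc (by omega)
          rw [hne]
          simp only [Bool.false_eq_true, if_false]
          rfl

-- ===== VERDICT (by name: the statement is the Claim_ definition above) =====
theorem attach_utility_tables_spec : Claim_equal_attach_utility_tables := by
  intro components schema usage_map _
  unfold Spec_attach_utility_tables
  simp only [attach_utility_tables, attach_utility_tables_alt]
  set ci := pvCompIndex components with hci
  set rels := pvGetRel schema with hrels
  set dec := pDecide ci usage_map rels with hdec
  have hstep : ci.keys.foldl (aStep ci usage_map (aFkAdj rels)) components =
      ci.keys.foldl (fun comps t => match dec t with
        | none => comps
        | some b => pApply comps (t, b)) components := by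
    apply PySem.List.foldl_congr_mem
    intro comps t _
    exact aStep_eq_pDecide ci usage_map rels comps t
  have hf := fuse dec ci.keys [] components
  simp only [List.foldl_nil] at hf
  rw [hstep, ← hf]
  set moves := ci.keys.foldl (fun ms t => match dec t with
    | none => ms
    | some b => ms ++ [(t, b)]) [] with hmoves
  have hfm : moves = ci.keys.filterMap (fun t => (dec t).map (fun b => (t, b))) := by
    rw [hmoves, moves_eq_filterMap]
    simp
  have hnd : (moves.map (fun m => m.1)).Nodup := by
    rw [hfm]
    exact List.Nodup.sublist (moves_fst_sublist dec ci.keys) (compIndex_keys_nodup components)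
  have hnn : ∀ m ∈ moves, 0 ≤ m.2 := by
    intro m hm
    rw [hfm, List.mem_filterMap] at hm
    obtain ⟨t, _, hm⟩ := hm
    rcases hd : dec t with _ | b
    · rw [hd] at hm; cases hm
    · rw [hd] at hm
      cases hm
      exact pDecide_nonneg ci usage_map rels t b (compIndex_nonneg components) hd
  rw [rebuild_main moves components hnd hnn, bMoves_eq, ← hmoves]
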